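-- pv_equiv track=rewrite | github.com/texta-tk/texta | utils/highlighter.py | _align_texts
-- ===== SOURCE A (Python) =====
-- def _align_texts(original_text, tagged_text):
--     alignment = []
--
--     tagged_text_idx = 0
--     for char in original_text:
--         while tagged_text[tagged_text_idx] == '<':
--             while tagged_text[tagged_text_idx] != '>':
--                 tagged_text_idx += 1
--             tagged_text_idx += 1
--
--         if char == tagged_text[tagged_text_idx]:
--             alignment.append(tagged_text_idx)
--
--         tagged_text_idx += 1
--
--     return alignment
-- ===== SOURCE B (Python) =====
-- def _align_texts(original_text, tagged_text):
--     content_indices = []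
--     in_tag = False
--     for i, c in enumerate(tagged_text):
--         if in_tag:
--             if c == '>':
--                 in_tag = False
--         elif c == '<':
--             in_tag = True
--         else:
--             content_indices.append(i)
--     alignment = []
--     for k, char in enumerate(original_text):
--         ti = content_indices[k]
--         if tagged_text[ti] == char:
--             alignment.append(ti)
--     return alignment
-- ===== Notes on version B (the rewrite author's own statement) =====
-- stated objective: alternative
-- what changed: B first scans tagged_text once with an in_tag flag to precompute the list of positions of all non-tag characters, then does a single flat enumerate pass over original_text indexing into that table, replacing A's nested tag-skipping while-loops inside the character loop.
import Mathlib
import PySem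

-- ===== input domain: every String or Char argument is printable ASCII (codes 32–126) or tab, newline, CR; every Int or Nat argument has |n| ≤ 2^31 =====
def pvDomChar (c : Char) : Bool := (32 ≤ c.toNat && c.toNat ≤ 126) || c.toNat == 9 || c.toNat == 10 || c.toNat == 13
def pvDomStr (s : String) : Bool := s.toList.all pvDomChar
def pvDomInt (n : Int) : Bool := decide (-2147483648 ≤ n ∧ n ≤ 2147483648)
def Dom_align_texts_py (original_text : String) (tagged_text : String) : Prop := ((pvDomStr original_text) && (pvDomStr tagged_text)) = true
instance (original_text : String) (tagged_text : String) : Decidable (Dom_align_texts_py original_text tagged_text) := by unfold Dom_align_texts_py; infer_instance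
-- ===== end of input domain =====

-- B replaces A's nested tag-skipping while-loops with a precomputed list of non-tag
-- character positions plus one flat indexed pass (alternative decomposition, same cost).


-- ===== PORT A =====
-- inner while: advance until tagged_text[i] == '>' then step past it; a Python
-- IndexError (scan runs off the end) is rendered as returning ts.length (outside Pre_).
def skipClose (ts : List Char) (i : Nat) : Nat :=
  if h : i < ts.length then
    if ts[i] = '>' then i + 1 else skipClose ts (i + 1)
  else ts.length
termination_by ts.length - i

theorem skipClose_ge (ts : List Char) (i : Nat) (h : i ≤ ts.length) : i ≤ skipClose ts i := by
  unfold skipClose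
  split
  · split
    · omega
    · have := skipClose_ge ts (i + 1) (by omega)
      omega
  · omega
termination_by ts.length - i

-- outer while: while tagged_text[i] == '<', skip the tag (out-of-range access,
-- which raises in Python, here exits the loop; such inputs are outside Pre_).
def skipTags (ts : List Char) (i : Nat) : Nat :=
  if h : i < ts.length then
    if ts[i] = '<' then skipTags ts (skipClose ts (i + 1))
    else i
  else i
termination_by ts.length - i
decreasing_by
  have := skipClose_ge ts (i + 1) (by omega)
  omega

-- the for-loop over original_text, carrying (tagged_text_idx, alignment)
def alignA (ts : List Char) (orig : List Char) (i : Nat) (acc : List Int) : List Int :=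
  match orig with
  | [] => acc
  | c :: r =>
    let j := skipTags ts i
    let acc' := if ts[j]? = some c then acc ++ [(j : Int)] else acc
    alignA ts r (j + 1) acc'

def align_texts_py (original_text : String) (tagged_text : String) : List Int :=
  alignA tagged_text.toList original_text.toList 0 []

-- ===== PORT B =====
-- first pass: positions of all non-tag characters (in_tag boolean scan)
def cidx (l : List Char) (i : Nat) (tag : Bool) : List Nat :=
  match l with
  | [] => []
  | c :: r =>
    if tag then cidx r (i + 1) (if c = '>' then false else true)
    else if c = '<' then cidx r (i + 1) true
    else i :: cidx r (i + 1) false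

-- second pass: flat enumerate over original_text; cis[k]? = none is Python's
-- IndexError (outside Pre_).
def alignB (ts : List Char) (cis : List Nat) (orig : List Char) (k : Nat) (acc : List Int) : List Int :=
  match orig with
  | [] => acc
  | c :: r =>
    match cis[k]? with
    | some ti => alignB ts cis r (k + 1) (if ts[ti]? = some c then acc ++ [(ti : Int)] else acc)
    | none => acc

def align_texts_py_alt (original_text : String) (tagged_text : String) : List Int :=
  let ts := tagged_text.toList
  alignB ts (cidx ts 0 false) original_text.toList 0 []

-- ===== PRECONDITION & SPEC =====
-- number of characters of the tagged text lying outside <...> tags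
def contentCount (l : List Char) (tag : Bool) : Nat :=
  match l with
  | [] => 0
  | c :: r =>
    if tag then contentCount r (if c = '>' then false else true)
    else if c = '<' then contentCount r true
    else contentCount r false + 1

-- Pre_ excludes exactly the inputs on which the Python A raises IndexError:
-- original_text longer than the non-tag content of tagged_text.
def Pre_align_texts_py (original_text : String) (tagged_text : String) : Prop :=
  original_text.toList.length ≤ contentCount tagged_text.toList false
instance (original_text : String) (tagged_text : String) : Decidable (Pre_align_texts_py original_text tagged_text) := by unfold Pre_align_texts_py; infer_instance

def pvWitness_align_texts_py : String × String := ("ab", "<i>ab</i>")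

def Spec_align_texts_py (original_text : String) (tagged_text : String) (out : List Int) : Prop := out = align_texts_py_alt original_text tagged_text
instance (original_text : String) (tagged_text : String) (out : List Int) : Decidable (Spec_align_texts_py original_text tagged_text out) := by unfold Spec_align_texts_py; infer_instance

-- ===== CLAIM (what is proved, stated in full; the proofs are below) =====
def Claim_equal_align_texts_py : Prop := ∀ (original_text : String) (tagged_text : String), Dom_align_texts_py original_text tagged_text → Pre_align_texts_py original_text tagged_text → Spec_align_texts_py original_text tagged_text (align_texts_py original_text tagged_text)

-- ===== LEMMAS AND PROOFS =====

-- alignB, but consuming the index list structurally (alignB with the first k entries dropped)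
def gB (ts : List Char) (cis : List Nat) (orig : List Char) (acc : List Int) : List Int :=
  match orig with
  | [] => acc
  | c :: r =>
    match cis with
    | ti :: cr => gB ts cr r (if ts[ti]? = some c then acc ++ [(ti : Int)] else acc)
    | [] => acc

theorem alignB_eq_gB (ts : List Char) (cis : List Nat) (orig : List Char) (k : Nat) (acc : List Int) :
    alignB ts cis orig k acc = gB ts (cis.drop k) orig acc := by
  induction orig generalizing k acc with
  | nil => simp [alignB, gB]
  | cons c r ih =>
    have hget : cis[k]? = (cis.drop k).head? := by
      rw [List.head?_drop]
    have hdrop : cis.drop (k + 1) = (cis.drop k).tail := by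
      rw [← List.drop_drop]
      simp
    cases hcd : cis.drop k with
    | nil =>
      simp [alignB, gB, hget, hcd]
    | cons ti cr =>
      simp only [alignB, gB, hget, hcd, List.head?]
      rw [ih, hdrop, hcd]
      rfl

theorem skipTags_stuck (ts : List Char) (i : Nat) (h : ts.length ≤ i) : skipTags ts i = i := by
  unfold skipTags
  simp [Nat.not_lt.mpr h]

theorem alignA_stuck (ts : List Char) (orig : List Char) (i : Nat) (acc : List Int)
    (h : ts.length ≤ i) : alignA ts orig i acc = acc := by
  induction orig generalizing i with
  | nil => rfl
  | cons c r ih =>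
    simp only [alignA, skipTags_stuck ts i h]
    have hg : ts[i]? = none := by
      rw [List.getElem?_eq_none_iff]; omega
    simp only [hg]
    have : ¬ (none = some c) := by simp
    rw [if_neg this]
    exact ih (i + 1) (by omega)

theorem cidx_tag_skip (ts : List Char) (m : Nat) :
    cidx (ts.drop m) m true = cidx (ts.drop (skipClose ts m)) (skipClose ts m) false := by
  by_cases h : m < ts.length
  · have hd : ts.drop m = ts[m] :: ts.drop (m + 1) := (List.getElem_cons_drop h).symm
    unfold skipClose
    rw [dif_pos h]
    by_cases hc : ts[m] = '>'
    · rw [hd, if_pos hc]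
      simp [cidx, hc]
    · rw [hd, if_neg hc]
      simp only [cidx, hc, reduceIte]
      exact cidx_tag_skip ts (m + 1)
  · unfold skipClose
    rw [dif_neg h]
    have h1 : ts.drop m = [] := List.drop_eq_nil_of_le (by omega)
    have h2 : ts.drop ts.length = [] := by simp
    rw [h1, h2]
    rfl
termination_by ts.length - m

theorem cidx_eq (ts : List Char) (i : Nat) :
    cidx (ts.drop i) i false =
      (if skipTags ts i < ts.length
        then skipTags ts i :: cidx (ts.drop (skipTags ts i + 1)) (skipTags ts i + 1) false
        else []) := by
  by_cases h : i < ts.length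
  · have hd : ts.drop i = ts[i] :: ts.drop (i + 1) := (List.getElem_cons_drop h).symm
    by_cases hc : ts[i] = '<'
    · have hst : skipTags ts i = skipTags ts (skipClose ts (i + 1)) := by
        conv_lhs => rw [skipTags]
        rw [dif_pos h, if_pos hc]
      rw [hd]
      simp only [cidx, hc, reduceCtorEq, if_false, reduceIte]
      have h1 : cidx (ts.drop (i + 1)) (i + 1) true
          = cidx (ts.drop (skipClose ts (i + 1))) (skipClose ts (i + 1)) false :=
        cidx_tag_skip ts (i + 1)
      rw [h1, hst]
      exact cidx_eq ts (skipClose ts (i + 1))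
    · have hst : skipTags ts i = i := by
        unfold skipTags; rw [dif_pos h, if_neg hc]
      rw [hd]
      simp only [cidx]
      rw [if_neg (by simp : ¬ (false = true)), if_neg hc, hst, if_pos h]
  · have h1 : ts.drop i = [] := List.drop_eq_nil_of_le (by omega)
    rw [h1, skipTags_stuck ts i (by omega), if_neg (by omega)]
    rfl
termination_by ts.length - i
decreasing_by
  have := skipClose_ge ts (i + 1) (by omega)
  omega

theorem main_eq (ts : List Char) (orig : List Char) (i : Nat) (acc : List Int) :
    gB ts (cidx (ts.drop i) i false) orig acc = alignA ts orig i acc := by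
  induction orig generalizing i acc with
  | nil => cases cidx (ts.drop i) i false <;> rfl
  | cons c r ih =>
    rw [cidx_eq ts i]
    set j := skipTags ts i with hj
    by_cases h : j < ts.length
    · rw [if_pos h]
      simp only [gB, alignA]
      exact ih (j + 1) _
    · rw [if_neg h]
      simp only [gB, alignA]
      have hg : ts[j]? = none := by rw [List.getElem?_eq_none_iff]; omega
      rw [hg, if_neg (by simp)]
      exact (alignA_stuck ts r (j + 1) acc (by omega)).symm

-- ===== VERDICT (by name: the statement is the Claim_ definition above) =====
theorem align_texts_py_spec : Claim_equal_align_texts_py := by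
  intro o t _ _
  unfold Spec_align_texts_py align_texts_py align_texts_py_alt
  rw [alignB_eq_gB]
  simpa using (main_eq t.toList o.toList 0 []).symm
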